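-- pv_equiv track=rewrite | github.com/FuxmanBass-lab/HIV-MPRA | Entropy/code/extract_hxb2_windows.py | build_coord_to_col
-- ===== SOURCE A (Python) =====
-- from typing import Dict, List, Tuple
--
-- def build_coord_to_col(hxb2_aln_seq: str, ref_start_coord: int) -> Dict[int, int]:
--     """Map HXB2 genomic coordinate -> alignment column index (0-based).
--
--     ref_start_coord is the HXB2 coordinate of the first non-gap base in `hxb2_aln_seq`
--     for *this alignment* (e.g., env often starts at 6225 for gp160; gag often starts at 790
--     if the alignment begins at the gag start codon).
--     """
--     coord_to_col: Dict[int, int] = {}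
--     coord = ref_start_coord
--     for col, base in enumerate(hxb2_aln_seq):
--         if base != "-":
--             coord_to_col[coord] = col
--             coord += 1
--     return coord_to_col
-- ===== SOURCE B (Python) =====
-- def build_coord_to_col(hxb2_aln_seq: str, ref_start_coord: int):
--     # Gap-run decomposition: split the alignment on '-', then block-fill the
--     # coordinate->column pairs for each contiguous run of bases arithmetically.
--     res = {}
--     col = 0
--     coord = ref_start_coord
--     for seg in hxb2_aln_seq.split('-'):
--         n = len(seg)
--         for j in range(n):
--             res[coord + j] = col + j
--         coord += n
--         col += n + 1
--     return res
-- ===== Notes on version B (the rewrite author's own statement) =====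
-- stated objective: alternative
-- what changed: Replaces A's per-character pass with a running coordinate counter by a gap-run decomposition: split the string on '-' and block-fill each contiguous run of bases with consecutive (coordinate, column) pairs computed arithmetically from the run's offsets.
import Mathlib
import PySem

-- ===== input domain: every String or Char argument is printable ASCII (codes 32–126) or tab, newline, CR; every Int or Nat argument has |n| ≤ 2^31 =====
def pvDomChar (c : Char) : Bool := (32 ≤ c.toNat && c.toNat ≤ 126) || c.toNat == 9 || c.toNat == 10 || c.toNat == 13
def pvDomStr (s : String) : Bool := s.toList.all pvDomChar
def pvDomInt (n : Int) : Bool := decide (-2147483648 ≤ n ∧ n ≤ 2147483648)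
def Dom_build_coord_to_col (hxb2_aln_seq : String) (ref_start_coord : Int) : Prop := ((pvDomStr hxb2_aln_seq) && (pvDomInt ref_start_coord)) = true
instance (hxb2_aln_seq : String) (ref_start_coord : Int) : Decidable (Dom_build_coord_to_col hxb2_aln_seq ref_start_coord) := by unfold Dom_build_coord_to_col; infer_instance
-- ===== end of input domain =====

-- B replaces A's per-character pass (running coordinate counter) by a gap-run
-- decomposition: split on '-', then block-fill each run arithmetically; same cost.

-- ===== PORT A =====
-- for col, base in enumerate(s): if base != '-': d[coord] = col; coord += 1
def build_coord_to_col (hxb2_aln_seq : String) (ref_start_coord : Int) : List (Int × Int) :=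
  ((PySem.List.enumerate hxb2_aln_seq.toList).foldl
    (fun (st : PySem.Dict Int Int × Int) cb =>
      if cb.2 != '-' then (st.1.insert st.2 cb.1, st.2 + 1) else st)
    (PySem.Dict.empty, ref_start_coord)).1.items

-- ===== PORT B =====
-- for seg in s.split('-'): n = len(seg); for j in range(n): res[coord+j] = col+j; coord += n; col += n+1
def build_coord_to_col_alt (hxb2_aln_seq : String) (ref_start_coord : Int) : List (Int × Int) :=
  ((PySem.Chars.splitOn hxb2_aln_seq.toList ['-']).foldl
    (fun (st : PySem.Dict Int Int × Int × Int) seg =>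
      let n : Int := seg.length
      ((PySem.List.pyRange 0 n 1).foldl
        (fun d j => d.insert (st.2.2 + j) (st.2.1 + j)) st.1,
       st.2.1 + n + 1, st.2.2 + n))
    (PySem.Dict.empty, 0, ref_start_coord)).1.items

-- ===== PRECONDITION & SPEC =====
def Spec_build_coord_to_col (hxb2_aln_seq : String) (ref_start_coord : Int) (out : List (Int × Int)) : Prop := out = build_coord_to_col_alt hxb2_aln_seq ref_start_coord
instance (hxb2_aln_seq : String) (ref_start_coord : Int) (out : List (Int × Int)) : Decidable (Spec_build_coord_to_col hxb2_aln_seq ref_start_coord out) := by unfold Spec_build_coord_to_col; infer_instance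

-- ===== CLAIM (what is proved, stated in full; the proofs are below) =====
def Claim_equal_build_coord_to_col : Prop := ∀ (hxb2_aln_seq : String) (ref_start_coord : Int), Dom_build_coord_to_col hxb2_aln_seq ref_start_coord → Spec_build_coord_to_col hxb2_aln_seq ref_start_coord (build_coord_to_col hxb2_aln_seq ref_start_coord)

-- ===== LEMMAS AND PROOFS =====

-- Reference pair list both loops compute, scanning from column `col`, coordinate `coord`.
def bccRef : List Char → Int → Int → List (Int × Int)
  | [], _, _ => []
  | b :: rest, col, coord =>
    if b != '-' then (coord, col) :: bccRef rest (col + 1) (coord + 1)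
    else bccRef rest (col + 1) coord

-- Structural model of splitting on '-' with an accumulated current segment.
def fSplit : List Char → List Char → List (List Char)
  | cur, [] => [cur.reverse]
  | cur, c :: rest => if c = '-' then cur.reverse :: fSplit [] rest else fSplit (c :: cur) rest

-- The block of pairs B fills for one run of n bases starting at (col, coord).
def blockFill : Nat → Int → Int → List (Int × Int)
  | 0, _, _ => []
  | n + 1, col, coord => (coord, col) :: blockFill n (col + 1) (coord + 1)

-- Pair list produced by B's segment processing.
def segProc : List (List Char) → Int → Int → List (Int × Int)
  | [], _, _ => []
  | seg :: rest, col, coord =>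
    blockFill seg.length col coord ++ segProc rest (col + seg.length + 1) (coord + seg.length)

lemma blockFill_succ_right (n : Nat) : ∀ (col coord : Int),
    blockFill (n + 1) col coord = blockFill n col coord ++ [(coord + n, col + n)] := by
  induction n with
  | zero => intro col coord; simp [blockFill]
  | succ m ih =>
    intro col coord
    rw [show blockFill (m + 1 + 1) col coord
          = (coord, col) :: blockFill (m + 1) (col + 1) (coord + 1) from rfl,
        ih (col + 1) (coord + 1),
        show blockFill (m + 1) col coord
          = (coord, col) :: blockFill m (col + 1) (coord + 1) from rfl]
    have e1 : coord + 1 + (m : Int) = coord + ((m + 1 : Nat) : Int) := by push_cast; ring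
    have e2 : col + 1 + (m : Int) = col + ((m + 1 : Nat) : Int) := by push_cast; ring
    rw [e1, e2]
    simp

lemma goEq (l : List Char) : ∀ (fuel : Nat) (cur : List Char) (acc : List (List Char)),
    l.length ≤ fuel →
    PySem.Chars.splitOn.go ['-'] fuel l cur acc = acc.reverse ++ fSplit cur l := by
  induction l with
  | nil =>
    intro fuel cur acc _
    cases fuel <;> rw [PySem.Chars.splitOn.go.eq_def] <;> simp [fSplit]
  | cons c rest ih =>
    intro fuel cur acc h
    cases fuel with
    | zero => simp at h
    | succ fuel =>
      rw [PySem.Chars.splitOn.go.eq_def]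
      simp only [List.isPrefixOf, Bool.and_true]
      by_cases hc : c = '-'
      · subst hc
        simp only [beq_self_eq_true, if_pos, List.length_singleton, List.drop_succ_cons,
          List.drop_zero]
        rw [ih fuel [] (cur.reverse :: acc) (by simpa using Nat.lt_succ_iff.mp (by simpa using h))]
        simp [fSplit]
      · have hne : ('-' == c) = false := by
          simp only [beq_eq_false_iff_ne, ne_eq]
          exact fun h' => hc h'.symm
        rw [if_neg (by simp [hne])]
        rw [ih fuel (c :: cur) acc (by simpa using Nat.lt_succ_iff.mp (by simpa using h))]
        simp [fSplit, hc]

lemma splitOn_eq_fSplit (l : List Char) :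
    PySem.Chars.splitOn l ['-'] = fSplit [] l := by
  unfold PySem.Chars.splitOn
  rw [goEq l (l.length + 1) [] [] (by omega)]
  simp

lemma segProc_fSplit (l : List Char) : ∀ (cur : List Char) (col coord : Int),
    segProc (fSplit cur l) (col - cur.length) (coord - cur.length)
      = blockFill cur.length (col - cur.length) (coord - cur.length) ++ bccRef l col coord := by
  induction l with
  | nil =>
    intro cur col coord
    simp [fSplit, segProc, bccRef]
  | cons c rest ih =>
    intro cur col coord
    by_cases hc : c = '-'
    · subst hc
      rw [show fSplit cur ('-' :: rest) = cur.reverse :: fSplit [] rest from by simp [fSplit]]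
      rw [show bccRef ('-' :: rest) col coord = bccRef rest (col + 1) coord from by
        simp [bccRef]]
      rw [segProc, List.length_reverse]
      have h1 : col - (cur.length : Int) + cur.length + 1 = (col + 1) - ((([] : List Char).length : Nat) : Int) := by
        simp only [List.length_nil]; push_cast; ring
      have h2 : coord - (cur.length : Int) + cur.length = coord - ((([] : List Char).length : Nat) : Int) := by
        simp only [List.length_nil]; push_cast; ring
      rw [h1, h2, ih [] (col + 1) coord]
      simp [blockFill]
    · rw [show fSplit cur (c :: rest) = fSplit (c :: cur) rest from by simp [fSplit, hc]]
      rw [show bccRef (c :: rest) col coord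
            = (coord, col) :: bccRef rest (col + 1) (coord + 1) from by simp [bccRef, hc]]
      have h1 : col - (cur.length : Int) = (col + 1) - (((c :: cur).length : Nat) : Int) := by
        simp only [List.length_cons]; push_cast; ring
      have h2 : coord - (cur.length : Int) = (coord + 1) - (((c :: cur).length : Nat) : Int) := by
        simp only [List.length_cons]; push_cast; ring
      rw [h1, h2, ih (c :: cur) (col + 1) (coord + 1)]
      rw [show ((c :: cur).length : Nat) = cur.length + 1 from rfl, blockFill_succ_right]
      rw [show (col + 1) - (((cur.length + 1 : Nat) : Nat) : Int) = col - cur.length from by push_cast; ring]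
      rw [show (coord + 1) - (((cur.length + 1 : Nat) : Nat) : Int) = coord - cur.length from by push_cast; ring]
      rw [show coord - (cur.length : Int) + cur.length = coord from by ring]
      rw [show col - (cur.length : Int) + cur.length = col from by ring]
      simp

-- A's dict loop produces bccRef (fresh keys: all existing keys below the running coord).
lemma bccLoopA (L : List Char) (col coord : Int) (d : PySem.Dict Int Int)
    (h : ∀ k ∈ d.keys, k < coord) :
    ((PySem.List.enumerate L col).foldl
      (fun (st : PySem.Dict Int Int × Int) cb =>
        if cb.2 != '-' then (st.1.insert st.2 cb.1, st.2 + 1) else st)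
      (d, coord)).1.items = d.items ++ bccRef L col coord := by
  induction L generalizing col coord d with
  | nil => simp [PySem.List.enumerate, bccRef]
  | cons b rest ih =>
    rw [PySem.List.enumerate_cons]
    simp only [List.foldl_cons, bccRef]
    by_cases hb : (b != '-') = true
    · have hfresh : d.contains coord = false := by
        rcases hc : d.contains coord with _ | _
        · rfl
        · exact absurd (h coord ((PySem.Dict.contains_iff_mem_keys d coord).mp hc))
            (lt_irrefl coord)
      rw [if_pos hb, if_pos hb, ih (col + 1) (coord + 1) _ ?_]
      · rw [PySem.Dict.items_insert_of_not_contains _ _ hfresh]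
        simp
      · intro k hk
        rcases (PySem.Dict.mem_keys_insert _ _ _ _).mp hk with h1 | h1
        · omega
        · have := h k h1; omega
    · rw [if_neg hb, if_neg hb, ih (col + 1) coord d h]

-- B's inner block fill over List.range: items appended as blockFill, keys bounded.
lemma innerRange (n : Nat) (col coord : Int) (d : PySem.Dict Int Int)
    (h : ∀ k ∈ d.keys, k < coord) :
    ((List.range n).foldl (fun d (j : Nat) => d.insert (coord + j) (col + j)) d).items
      = d.items ++ blockFill n col coord
    ∧ (∀ k ∈ ((List.range n).foldl
        (fun d (j : Nat) => d.insert (coord + j) (col + j)) d).keys, k < coord + n) := by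
  induction n with
  | zero =>
    refine ⟨by simp [blockFill], ?_⟩
    intro k hk
    have := h k (by simpa using hk)
    omega
  | succ m ih =>
    obtain ⟨ihItems, ihKeys⟩ := ih
    rw [List.range_succ, List.foldl_append]
    have hfresh : (((List.range m).foldl
        (fun d (j : Nat) => d.insert (coord + (j : Int)) (col + (j : Int))) d)).contains
        (coord + (m : Int)) = false := by
      rcases hc : (((List.range m).foldl
          (fun d (j : Nat) => d.insert (coord + (j : Int)) (col + (j : Int))) d)).contains
          (coord + (m : Int)) with _ | _
      · rfl
      · have := ihKeys _ ((PySem.Dict.contains_iff_mem_keys _ _).mp hc)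
        omega
    constructor
    · simp only [List.foldl_cons, List.foldl_nil]
      rw [PySem.Dict.items_insert_of_not_contains _ _ hfresh, ihItems,
        blockFill_succ_right]
      simp
    · intro k hk
      simp only [List.foldl_cons, List.foldl_nil] at hk
      rcases (PySem.Dict.mem_keys_insert _ _ _ _).mp hk with h1 | h1
      · push_cast; omega
      · have := ihKeys k h1; push_cast; omega

-- Same statement for the pyRange form B actually folds over.
lemma innerB (n : Nat) (col coord : Int) (d : PySem.Dict Int Int)
    (h : ∀ k ∈ d.keys, k < coord) :
    ((PySem.List.pyRange 0 (n : Int) 1).foldl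
        (fun d j => d.insert (coord + j) (col + j)) d).items
      = d.items ++ blockFill n col coord
    ∧ (∀ k ∈ ((PySem.List.pyRange 0 (n : Int) 1).foldl
        (fun d j => d.insert (coord + j) (col + j)) d).keys, k < coord + n) := by
  have hr : PySem.List.pyRange 0 (n : Int) 1 = (List.range n).map (Nat.cast : Nat → Int) := by
    rw [PySem.List.pyRange_one]
    simp only [sub_zero, Int.toNat_natCast, zero_add]
  rw [hr, List.foldl_map]
  exact innerRange n col coord d h

-- B's outer segment loop produces segProc.
lemma segLoopB (segs : List (List Char)) : ∀ (col coord : Int) (d : PySem.Dict Int Int),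
    (∀ k ∈ d.keys, k < coord) →
    (segs.foldl
      (fun (st : PySem.Dict Int Int × Int × Int) seg =>
        let n : Int := seg.length
        ((PySem.List.pyRange 0 n 1).foldl
          (fun d j => d.insert (st.2.2 + j) (st.2.1 + j)) st.1,
         st.2.1 + n + 1, st.2.2 + n))
      (d, col, coord)).1.items = d.items ++ segProc segs col coord := by
  induction segs with
  | nil => intro col coord d _; simp [segProc]
  | cons seg rest ih =>
    intro col coord d h
    obtain ⟨hItems, hKeys⟩ := innerB seg.length col coord d h
    simp only [List.foldl_cons, segProc]
    rw [ih (col + seg.length + 1) (coord + seg.length) _ hKeys, hItems]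
    simp

-- B equals segProc over the split, which equals bccRef.
lemma altEq (s : String) (r : Int) :
    build_coord_to_col_alt s r = bccRef s.toList 0 r := by
  unfold build_coord_to_col_alt
  rw [splitOn_eq_fSplit, segLoopB _ 0 r PySem.Dict.empty (by simp [PySem.Dict.keys_empty])]
  have := segProc_fSplit s.toList [] 0 r
  simp only [List.length_nil, Nat.cast_zero, sub_zero, blockFill, List.nil_append] at this
  rw [this]
  rfl

-- ===== VERDICT (by name: the statement is the Claim_ definition above) =====
theorem build_coord_to_col_spec : Claim_equal_build_coord_to_col := by
  intro s r _
  show build_coord_to_col s r = build_coord_to_col_alt s r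
  unfold build_coord_to_col
  rw [bccLoopA s.toList 0 r PySem.Dict.empty (by simp [PySem.Dict.keys_empty]), altEq]
  rfl
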